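-- pv_equiv track=rewrite | github.com/MarniTausen/Greenotyper | greenotyperAPI/GREENOTYPER.py | _get_pot_labels
-- ===== SOURCE A (Python) =====
-- def _get_pot_labels(NS, EW, orientatation):
--
--     labels = []
--
--     if orientatation=="E":
--         for ew in range(EW[0], EW[1]+1):
--             for ns in range(NS[0], NS[1]+1):
--                 labels.append([ns, ew])
--     if orientatation=="W":
--         for ew in range(EW[1], EW[0]-1, -1):
--             for ns in range(NS[1], NS[0]-1, -1):
--                 labels.append([ns, ew])
--     if orientatation=="N":
--         for ns in range(NS[1], NS[0]-1, -1):
--             for ew in range(EW[0], EW[1]+1):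
--                 labels.append([ns, ew])
--     if orientatation=="S":
--         for ns in range(NS[0], NS[1]+1):
--             for ew in range(EW[1], EW[0]-1, -1):
--                 labels.append([ns, ew])
--
--     return(labels)
-- ===== SOURCE B (Python) =====
-- def _get_pot_labels(NS, EW, orientatation):
--     # Index arithmetic: k-th label of the flattened grid via divmod, one flat pass.
--     n_ns = max(0, NS[1] - NS[0] + 1)
--     n_ew = max(0, EW[1] - EW[0] + 1)
--     forms = {
--         "E": (n_ns, lambda q, r: [NS[0] + r, EW[0] + q]),
--         "W": (n_ns, lambda q, r: [NS[1] - r, EW[1] - q]),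
--         "N": (n_ew, lambda q, r: [NS[1] - q, EW[0] + r]),
--         "S": (n_ew, lambda q, r: [NS[0] + q, EW[1] - r]),
--     }
--     if orientatation not in forms:
--         return []
--     m, make = forms[orientatation]
--     return [make(*divmod(k, m)) for k in range(n_ns * n_ew)]
-- ===== Notes on version B (the rewrite author's own statement) =====
-- stated objective: alternative
-- what changed: B replaces A's four nested double loops by closed-form index arithmetic: one flat pass over range(n_ns*n_ew) computing each label from divmod(k, inner_count) with a per-orientation affine formula looked up in a table.
import Mathlib
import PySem

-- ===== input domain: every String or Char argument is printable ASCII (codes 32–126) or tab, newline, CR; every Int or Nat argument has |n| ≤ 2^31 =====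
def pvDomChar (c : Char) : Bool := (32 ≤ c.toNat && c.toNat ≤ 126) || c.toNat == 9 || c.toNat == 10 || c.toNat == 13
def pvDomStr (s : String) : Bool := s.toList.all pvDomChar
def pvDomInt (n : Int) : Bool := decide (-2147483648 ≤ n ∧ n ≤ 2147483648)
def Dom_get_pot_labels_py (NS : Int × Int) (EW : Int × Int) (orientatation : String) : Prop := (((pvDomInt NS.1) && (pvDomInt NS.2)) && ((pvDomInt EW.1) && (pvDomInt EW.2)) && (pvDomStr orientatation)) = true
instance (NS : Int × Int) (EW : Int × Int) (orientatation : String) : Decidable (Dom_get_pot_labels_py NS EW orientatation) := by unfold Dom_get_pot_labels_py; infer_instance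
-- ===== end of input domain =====

-- B replaces A's four nested loops by one flat pass with divmod index arithmetic (alternative decomposition, same cost).

-- ===== PORT A =====
def get_pot_labels_py (NS : Int × Int) (EW : Int × Int) (orientatation : String) : List (List Int) :=
  let labels : List (List Int) := []
  let labels := if orientatation == "E" then
      (PySem.List.pyRange EW.1 (EW.2 + 1) 1).foldl (fun acc ew =>
        (PySem.List.pyRange NS.1 (NS.2 + 1) 1).foldl (fun acc ns => acc ++ [[ns, ew]]) acc) labels
    else labels
  let labels := if orientatation == "W" then
      (PySem.List.pyRange EW.2 (EW.1 - 1) (-1)).foldl (fun acc ew =>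
        (PySem.List.pyRange NS.2 (NS.1 - 1) (-1)).foldl (fun acc ns => acc ++ [[ns, ew]]) acc) labels
    else labels
  let labels := if orientatation == "N" then
      (PySem.List.pyRange NS.2 (NS.1 - 1) (-1)).foldl (fun acc ns =>
        (PySem.List.pyRange EW.1 (EW.2 + 1) 1).foldl (fun acc ew => acc ++ [[ns, ew]]) acc) labels
    else labels
  let labels := if orientatation == "S" then
      (PySem.List.pyRange NS.1 (NS.2 + 1) 1).foldl (fun acc ns =>
        (PySem.List.pyRange EW.2 (EW.1 - 1) (-1)).foldl (fun acc ew => acc ++ [[ns, ew]]) acc) labels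
    else labels
  labels

-- ===== PORT B =====
-- divmod(k, m) is ported as (floordiv k m, mod k m); it is only evaluated for
-- 0 ≤ k < n_ns*n_ew, where m > 0, so this is exact (no ZeroDivisionError reachable).
def get_pot_labels_py_alt (NS : Int × Int) (EW : Int × Int) (orientatation : String) : List (List Int) :=
  let n_ns : Int := max 0 (NS.2 - NS.1 + 1)
  let n_ew : Int := max 0 (EW.2 - EW.1 + 1)
  let forms : PySem.Dict String (Int × (Int → Int → List Int)) :=
    PySem.Dict.mk [("E", (n_ns, fun q r => [NS.1 + r, EW.1 + q])),
     ("W", (n_ns, fun q r => [NS.2 - r, EW.2 - q])),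
     ("N", (n_ew, fun q r => [NS.2 - q, EW.1 + r])),
     ("S", (n_ew, fun q r => [NS.1 + q, EW.2 - r]))]
  match PySem.Dict.get? forms orientatation with
  | none => []
  | some (m, make) =>
      (PySem.List.pyRange 0 (n_ns * n_ew) 1).map
        (fun k => make (PySem.Int.floordiv k m) (PySem.Int.mod k m))

-- ===== PRECONDITION & SPEC =====
def Spec_get_pot_labels_py (NS : Int × Int) (EW : Int × Int) (orientatation : String) (out : List (List Int)) : Prop := out = get_pot_labels_py_alt NS EW orientatation
instance (NS : Int × Int) (EW : Int × Int) (orientatation : String) (out : List (List Int)) : Decidable (Spec_get_pot_labels_py NS EW orientatation out) := by unfold Spec_get_pot_labels_py; infer_instance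

-- ===== CLAIM =====
def Claim_equal_get_pot_labels_py : Prop := ∀ (NS : Int × Int) (EW : Int × Int) (orientatation : String), Dom_get_pot_labels_py NS EW orientatation → Spec_get_pot_labels_py NS EW orientatation (get_pot_labels_py NS EW orientatation)

-- ===== LEMMAS AND PROOFS =====
-- A's nested append-loop equals init ++ the flatMap of maps.
theorem pv_nested (xs ys : List Int) (f : Int → Int → List Int) (init : List (List Int)) :
    xs.foldl (fun acc x => ys.foldl (fun acc y => acc ++ [f x y]) acc) init
      = init ++ xs.flatMap (fun x => ys.map (f x)) := by
  induction xs generalizing init with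
  | nil => simp
  | cons x xs ih =>
    rw [List.foldl_cons, PySem.List.foldl_append_singleton_eq_map, ih, List.flatMap_cons,
      List.append_assoc]

-- the flattened n1 × n2 grid, addressed by a single index k via div/mod
theorem pv_grid_index {α : Type} (f : Nat → Nat → α) (n1 n2 : Nat) :
    (List.range n1).flatMap (fun i => (List.range n2).map (fun j => f i j))
      = (List.range (n1 * n2)).map (fun k => f (k / n2) (k % n2)) := by
  induction n1 with
  | zero => simp
  | succ n ih =>
    rcases Nat.eq_zero_or_pos n2 with h | h
    · simp [h]
    · rw [List.range_succ, List.flatMap_append, ih, Nat.succ_mul, List.range_add,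
        List.map_append, List.map_map, List.flatMap_singleton]
      congr 1
      apply List.map_congr_left
      intro j hj
      rw [List.mem_range] at hj
      have hd : (n * n2 + j) / n2 = n := by
        rw [Nat.add_comm, Nat.add_mul_div_right _ _ h, Nat.div_eq_of_lt hj, Nat.zero_add]
      have hm : (n * n2 + j) % n2 = j := by
        rw [Nat.add_comm, Nat.add_mul_mod_self_right, Nat.mod_eq_of_lt hj]
      simp [hd, hm]

-- one orientation: A's nested double fold = B's single map over the flat index range
theorem pv_case (a b c d : Int) (g : Int → Int → List Int)
    (out ino : Bool) :
    -- outer range over [a,b] (ascending if out, else descending), inner over [c,d]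
    ((if out then PySem.List.pyRange a (b + 1) 1 else PySem.List.pyRange b (a - 1) (-1)).flatMap
      (fun x => (if ino then PySem.List.pyRange c (d + 1) 1 else PySem.List.pyRange d (c - 1) (-1)).map
        (fun y => g x y)))
      = (PySem.List.pyRange 0 (max 0 (b + 1 - a) * max 0 (d + 1 - c)) 1).map
          (fun k =>
            g (if out then a + PySem.Int.floordiv k (max 0 (d + 1 - c))
               else b - PySem.Int.floordiv k (max 0 (d + 1 - c)))
              (if ino then c + PySem.Int.mod k (max 0 (d + 1 - c))
               else d - PySem.Int.mod k (max 0 (d + 1 - c)))) := by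
  have h1 : max 0 (b + 1 - a) = ((b + 1 - a).toNat : Int) := by omega
  have h2 : max 0 (d + 1 - c) = ((d + 1 - c).toNat : Int) := by omega
  have htot : max 0 (b + 1 - a) * max 0 (d + 1 - c)
      = (((b + 1 - a).toNat * (d + 1 - c).toNat : Nat) : Int) := by
    rw [h1, h2]; push_cast; ring
  have hod : (b - (a - 1)).toNat = (b + 1 - a).toNat := by omega
  have hid : (d - (c - 1)).toNat = (d + 1 - c).toNat := by omega
  rw [htot, PySem.List.pyRange_one]
  cases out <;> cases ino <;>
    simp only [if_true, if_false, Bool.false_eq_true,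
      PySem.List.pyRange_one, PySem.List.pyRange_neg_one, hod, hid,
      List.flatMap_map, List.map_map] <;>
  · rw [pv_grid_index (n1 := (b + 1 - a).toNat) (n2 := (d + 1 - c).toNat)]
    apply List.map_congr_left
    intro k hk
    rw [List.mem_range] at hk
    simp only [Function.comp, zero_add, h2, PySem.Int.floordiv_natCast, PySem.Int.mod_natCast]

-- unfolding the four-entry table lookup
theorem pv_get_forms (o : String) (vE vW vN vS : Int × (Int → Int → List Int)) :
    PySem.Dict.get? (PySem.Dict.mk [("E", vE), ("W", vW), ("N", vN), ("S", vS)]) o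
      = if "E" == o then some vE else if "W" == o then some vW
        else if "N" == o then some vN else if "S" == o then some vS else none := by
  simp only [PySem.Dict.get?_mk_cons]
  split_ifs <;> simp [PySem.Dict.get?]

-- ===== VERDICT =====
theorem get_pot_labels_py_spec : Claim_equal_get_pot_labels_py := by
  intro NS EW o _
  unfold Spec_get_pot_labels_py get_pot_labels_py get_pot_labels_py_alt
  simp only [pv_get_forms]
  by_cases hE : o = "E"
  · subst hE
    simp only [String.reduceBEq, if_true, if_false, beq_self_eq_true, Bool.false_eq_true]
    rw [pv_nested, List.nil_append]
    have := pv_case EW.1 EW.2 NS.1 NS.2 (fun ew ns => [ns, ew]) true true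
    simp only [if_true] at this
    rw [this, add_sub_right_comm, add_sub_right_comm, mul_comm]
  by_cases hW : o = "W"
  · subst hW
    simp only [String.reduceBEq, if_true, if_false, beq_self_eq_true, Bool.false_eq_true]
    rw [pv_nested, List.nil_append]
    have := pv_case EW.1 EW.2 NS.1 NS.2 (fun ew ns => [ns, ew]) false false
    simp only [if_true, if_false, Bool.false_eq_true] at this
    rw [this, add_sub_right_comm, add_sub_right_comm, mul_comm]
  by_cases hN : o = "N"
  · subst hN
    simp only [String.reduceBEq, if_true, if_false, beq_self_eq_true, Bool.false_eq_true]
    rw [pv_nested, List.nil_append]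
    have := pv_case NS.1 NS.2 EW.1 EW.2 (fun ns ew => [ns, ew]) false true
    simp only [if_true, if_false, Bool.false_eq_true] at this
    rw [this, add_sub_right_comm, add_sub_right_comm]
  by_cases hS : o = "S"
  · subst hS
    simp only [String.reduceBEq, if_true, if_false, beq_self_eq_true, Bool.false_eq_true]
    rw [pv_nested, List.nil_append]
    have := pv_case NS.1 NS.2 EW.1 EW.2 (fun ns ew => [ns, ew]) true false
    simp only [if_true, if_false, Bool.false_eq_true] at this
    rw [this, add_sub_right_comm, add_sub_right_comm]
  · have h1 : "E" ≠ o := fun h => hE h.symm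
    have h2 : "W" ≠ o := fun h => hW h.symm
    have h3 : "N" ≠ o := fun h => hN h.symm
    have h4 : "S" ≠ o := fun h => hS h.symm
    simp [pv_get_forms, h1, h2, h3, h4, hE, hW, hN, hS]
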